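-- pv_equiv track=rewrite | github.com/diegoaldea/leafnoise-challenge | reversed_texts.py | text_reverser
-- ===== SOURCE A (Python) =====
-- def text_reverser(text):
--     words = []
--     text_reversed = []
--
--     word = ""
--     count = 0
--     for letter in text:
--         if letter == " " or letter == ",":
--             words.append(word)
--             if letter == ",":
--                 words.append(",")
--             word = ""
--         elif count == len(text) - 1:
--             word += letter
--             words.append(word)
--         else:
--             word += letter
--         count += 1
--
--     text_reversed = " ".join(words[::-1])
--
--     return text_reversed
-- ===== SOURCE B (Python) =====
-- def text_reverser(text):
--     # Delimiter-index scan: cut out each token as a slice between delimiters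
--     # (a trailing slice only when something follows the last delimiter),
--     # then join the token list in reverse.
--     tokens = []
--     start = 0
--     for i, ch in enumerate(text):
--         if ch == " " or ch == ",":
--             tokens.append(text[start:i])
--             if ch == ",":
--                 tokens.append(",")
--             start = i + 1
--     if start < len(text):
--         tokens.append(text[start:])
--     return " ".join(tokens[::-1])
-- ===== Notes on version B (the rewrite author's own statement) =====
-- stated objective: simpler
-- what changed: Replaces A's per-character accumulator state machine (building each word char by char with a count-based last-character special case) by a delimiter-index scan that cuts every token out of the string as a slice between delimiters, appending the trailing slice only when characters follow the last delimiter.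
import Mathlib
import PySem

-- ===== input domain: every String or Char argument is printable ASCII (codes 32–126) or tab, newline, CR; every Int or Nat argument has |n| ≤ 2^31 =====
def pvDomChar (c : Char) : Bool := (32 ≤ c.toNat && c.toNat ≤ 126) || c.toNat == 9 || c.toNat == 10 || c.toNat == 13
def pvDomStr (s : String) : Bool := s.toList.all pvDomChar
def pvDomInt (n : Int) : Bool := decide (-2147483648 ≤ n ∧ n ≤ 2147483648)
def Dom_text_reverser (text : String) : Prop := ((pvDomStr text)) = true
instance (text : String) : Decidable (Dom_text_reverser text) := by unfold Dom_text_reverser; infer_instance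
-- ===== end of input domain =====

-- B replaces A's per-character accumulator/counter state machine by a delimiter-index scan that
-- cuts each token out as a slice (objective: simpler); same return value on every input.

-- ===== PORT A =====
-- loop body of A's 'for letter in text' (state: words, word, count)
def pvStepA (cs : List Char) (st : List (List Char) × List Char × Int) (letter : Char) :
    List (List Char) × List Char × Int :=
  match st with
  | (words, word, count) =>
    if letter = ' ' ∨ letter = ',' then
      (words ++ [word] ++ (if letter = ',' then [[',']] else []), [], count + 1)
    else if count = (cs.length : Int) - 1 then
      (words ++ [word ++ [letter]], word ++ [letter], count + 1)
    else
      (words, word ++ [letter], count + 1)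

def text_reverser (text : String) : String :=
  let cs := text.toList
  let st := cs.foldl (pvStepA cs) ([], [], 0)
  String.ofList (PySem.Chars.join [' '] st.1.reverse)  -- " ".join(words[::-1])

-- ===== PORT B =====
-- loop body of B's 'for i, ch in enumerate(text)' (state: tokens, start)
def pvStepB (cs : List Char) (st : List (List Char) × Int) (p : Int × Char) :
    List (List Char) × Int :=
  match st, p with
  | (tokens, start), (i, ch) =>
    if ch = ' ' ∨ ch = ',' then
      (tokens ++ [PySem.List.slice cs (some start) (some i)]
         ++ (if ch = ',' then [[',']] else []), i + 1)
    else (tokens, start)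

def text_reverser_alt (text : String) : String :=
  let cs := text.toList
  let st := (PySem.List.enumerate cs).foldl (pvStepB cs) ([], 0)
  let tokens :=
    if st.2 < (cs.length : Int) then st.1 ++ [PySem.List.slice cs (some st.2) none] else st.1
  String.ofList (PySem.Chars.join [' '] tokens.reverse)  -- " ".join(tokens[::-1])

-- ===== PRECONDITION & SPEC =====
def Spec_text_reverser (text : String) (out : String) : Prop := out = text_reverser_alt text
instance (text : String) (out : String) : Decidable (Spec_text_reverser text out) := by unfold Spec_text_reverser; infer_instance

-- ===== CLAIM (what is proved, stated in full; the proofs are below) =====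
def Claim_equal_text_reverser : Prop := ∀ (text : String), Dom_text_reverser text → Spec_text_reverser text (text_reverser text)

-- ===== LEMMAS AND PROOFS =====

-- common token-list specification: tokens of the remaining text, w = chars since the last delimiter
def pvTok : List Char → List Char → List (List Char)
  | w, [] => if w = [] then [] else [w]
  | w, l :: rest =>
    if l = ' ' then w :: pvTok [] rest
    else if l = ',' then w :: [','] :: pvTok [] rest
    else pvTok (w ++ [l]) rest

-- A's words as a recursion (trailing word appended only by the last-char branch)
def pvTokA : List Char → List Char → List (List Char)
  | _, [] => []
  | w, l :: rest =>
    if l = ' ' then w :: pvTokA [] rest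
    else if l = ',' then w :: [','] :: pvTokA [] rest
    else if rest = [] then [w ++ [l]]
    else pvTokA (w ++ [l]) rest

lemma pvLoopA (cs : List Char) : ∀ (rest : List Char) (words : List (List Char))
    (w : List Char) (c : Int), c + rest.length = cs.length →
    (rest.foldl (pvStepA cs) (words, w, c)).1 = words ++ pvTokA w rest := by
  intro rest
  induction rest with
  | nil => intro words w c _; simp [pvTokA]
  | cons l rest ih =>
    intro words w c hc
    simp only [List.length_cons] at hc
    by_cases hsp : l = ' '
    · rw [List.foldl_cons]
      simp only [pvStepA]
      rw [if_pos (Or.inl hsp), if_neg (by subst hsp; decide)]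
      rw [ih _ [] (c + 1) (by push_cast at hc; omega)]
      simp [pvTokA, hsp]
    · by_cases hcm : l = ','
      · rw [List.foldl_cons]
        simp only [pvStepA]
        rw [if_pos (Or.inr hcm), if_pos hcm]
        rw [ih _ [] (c + 1) (by push_cast at hc; omega)]
        simp [pvTokA, hcm]
      · rcases eq_or_ne rest [] with hr | hr
        · subst hr
          rw [List.foldl_cons]
          simp only [pvStepA]
          rw [if_neg (by simp [hsp, hcm])]
          rw [if_pos (by simp at hc; omega)]
          simp [pvTokA, hsp, hcm]
        · rw [List.foldl_cons]
          simp only [pvStepA]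
          rw [if_neg (by simp [hsp, hcm])]
          rw [if_neg (by
            intro h
            have : (rest.length : Int) = 0 := by push_cast at hc ⊢; omega
            simp at this
            exact hr this)]
          rw [ih _ (w ++ [l]) (c + 1) (by push_cast at hc; omega)]
          simp [pvTokA, hsp, hcm, hr]

lemma pvTokA_eq_pvTok : ∀ (rest : List Char) (w : List Char), (rest = [] → w = []) →
    pvTokA w rest = pvTok w rest := by
  intro rest
  induction rest with
  | nil => intro w hw; simp [pvTokA, pvTok, hw rfl]
  | cons l rest ih =>
    intro w hw
    by_cases hsp : l = ' '
    · simp [pvTokA, pvTok, hsp, ih [] (fun _ => rfl)]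
    · by_cases hc : l = ','
      · simp [pvTokA, pvTok, hc, ih [] (fun _ => rfl)]
      · rcases eq_or_ne rest [] with hr | hr
        · subst hr; simp [pvTokA, pvTok, hsp, hc]
        · simp [pvTokA, pvTok, hsp, hc, hr, ih (w ++ [l]) (fun h => absurd h hr)]

lemma pvLoopB (cs : List Char) : ∀ (suf : List Char) (k s : Nat) (tokens : List (List Char)),
    s ≤ k → cs.drop k = suf → k ≤ cs.length →
    (if ((PySem.List.enumerate suf (k : Int)).foldl (pvStepB cs) (tokens, (s : Int))).2 < (cs.length : Int) then
       ((PySem.List.enumerate suf (k : Int)).foldl (pvStepB cs) (tokens, (s : Int))).1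
         ++ [PySem.List.slice cs (some ((PySem.List.enumerate suf (k : Int)).foldl (pvStepB cs) (tokens, (s : Int))).2) none]
     else ((PySem.List.enumerate suf (k : Int)).foldl (pvStepB cs) (tokens, (s : Int))).1)
    = tokens ++ pvTok ((cs.drop s).take (k - s)) suf := by
  intro suf
  induction suf with
  | nil =>
    intro k s tokens hsk hdrop hk
    have hklen : k = cs.length := by
      have := List.drop_eq_nil_iff.mp hdrop
      omega
    subst hklen
    simp only [PySem.List.enumerate_nil, List.foldl_nil]
    have htake : (cs.drop s).take (cs.length - s) = cs.drop s :=
      List.take_of_length_le (by simp)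
    rw [htake]
    by_cases hs : s < cs.length
    · rw [if_pos (by exact_mod_cast hs), PySem.List.slice_from_natCast]
      have hne : cs.drop s ≠ [] := by
        intro h
        have := List.drop_eq_nil_iff.mp h
        omega
      simp [pvTok, hne]
    · rw [if_neg (by exact_mod_cast hs)]
      have hse : s = cs.length := by omega
      rw [hse, List.drop_length]
      simp [pvTok]
  | cons ch suf ih =>
    intro k s tokens hsk hdrop hk
    have hlen : (cs.drop k).length = suf.length + 1 := by rw [hdrop]; simp
    rw [List.length_drop] at hlen
    have hk' : k < cs.length := by omega
    have hdrop' : cs.drop (k + 1) = suf := by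
      have h1 : cs.drop (k + 1) = (cs.drop k).drop 1 := by
        rw [List.drop_drop]
      rw [h1, hdrop]
      rfl
    have hget : cs[k]? = some ch := by
      have h0 : (cs.drop k)[0]? = some ch := by rw [hdrop]; rfl
      rw [List.getElem?_drop] at h0
      simpa using h0
    have hcast : ((k : Nat) : Int) + 1 = (((k + 1 : Nat)) : Int) := by push_cast; ring
    rw [PySem.List.enumerate_cons, List.foldl_cons]
    by_cases hsp : ch = ' '
    · simp only [pvStepB]
      rw [if_pos (Or.inl hsp), if_neg (show ¬ ch = ',' from by simp [hsp])]
      rw [hcast, ih (k + 1) (k + 1) _ (Nat.le_refl _) hdrop' (by omega)]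
      rw [PySem.List.slice_natCast]
      simp [pvTok, hsp]
    · by_cases hcm : ch = ','
      · simp only [pvStepB]
        rw [if_pos (Or.inr hcm), if_pos hcm]
        rw [hcast, ih (k + 1) (k + 1) _ (Nat.le_refl _) hdrop' (by omega)]
        rw [PySem.List.slice_natCast]
        simp [pvTok, hcm]
      · simp only [pvStepB]
        rw [if_neg (show ¬ (ch = ' ' ∨ ch = ',') from by simp [hsp, hcm])]
        rw [hcast, ih (k + 1) s tokens (by omega) hdrop' (by omega)]
        have hstep : (cs.drop s).take (k + 1 - s) = (cs.drop s).take (k - s) ++ [ch] := by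
          rw [show k + 1 - s = (k - s) + 1 by omega, List.take_add_one]
          have hx : (cs.drop s)[k - s]? = some ch := by
            rw [List.getElem?_drop, show s + (k - s) = k by omega]
            exact hget
          simp [hx]
        rw [hstep, show pvTok ((cs.drop s).take (k - s)) (ch :: suf)
              = pvTok ((cs.drop s).take (k - s) ++ [ch]) suf from by simp [pvTok, hsp, hcm]]

-- ===== VERDICT (by name: the statement is the Claim_ definition above) =====
theorem text_reverser_spec : Claim_equal_text_reverser := by
  intro text _
  unfold Spec_text_reverser text_reverser text_reverser_alt
  have hA := pvLoopA text.toList text.toList [] [] 0 (by simp)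
  have hB := pvLoopB text.toList text.toList 0 0 [] (Nat.le_refl 0) rfl (Nat.zero_le _)
  simp only [Nat.cast_zero, List.drop_zero, Nat.sub_zero, List.take_zero] at hB
  simp only [hA, hB, List.nil_append]
  rw [pvTokA_eq_pvTok _ _ (by intro h; rfl)]
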